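-- pv_equiv track=rewrite | github.com/justkidding-scripts/hollistisk-v2 | check_deployment.py | _check_if_blocked
-- ===== SOURCE A (Python) =====
-- def _check_if_blocked(html_content):
--     """Check if page might be blocked by security filters"""
--     blocked_indicators = [
--         'deceptive site',
--         'security warning',
--         'blocked by',
--         'malicious',
--         'phishing',
--         'dangerous'
--     ]
--
--     content_lower = html_content.lower()
--     for indicator in blocked_indicators:
--         if indicator in content_lower:
--             return True
--
--     return False
-- ===== SOURCE B (Python) =====
-- def _check_if_blocked(html_content):
--     """Check if page might be blocked by security filters"""
--     blocked_indicators = (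
--         'deceptive site',
--         'security warning',
--         'blocked by',
--         'malicious',
--         'phishing',
--         'dangerous',
--     )
--     content = html_content.lower()
--     for i in range(len(content)):
--         for indicator in blocked_indicators:
--             if content.startswith(indicator, i):
--                 return True
--     return False
-- ===== Notes on version B (the rewrite author's own statement) =====
-- stated objective: alternative
-- what changed: B scans the lowercased content position by position, testing at each offset whether any indicator starts there (one pass over the text, inner loop over patterns), instead of A's six independent full substring searches (outer loop over patterns).
import Mathlib
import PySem

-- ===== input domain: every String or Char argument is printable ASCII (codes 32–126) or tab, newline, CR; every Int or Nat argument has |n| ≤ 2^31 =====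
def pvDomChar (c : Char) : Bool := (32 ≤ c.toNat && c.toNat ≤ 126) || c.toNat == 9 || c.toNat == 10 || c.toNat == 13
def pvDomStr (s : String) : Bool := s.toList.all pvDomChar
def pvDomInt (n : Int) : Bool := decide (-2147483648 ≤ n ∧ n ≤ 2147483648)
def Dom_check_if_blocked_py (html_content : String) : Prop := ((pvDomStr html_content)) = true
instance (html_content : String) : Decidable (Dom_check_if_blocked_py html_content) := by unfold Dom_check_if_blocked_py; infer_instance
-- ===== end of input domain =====

-- B is an alternative, same-cost implementation: one position-by-position scan of the
-- lowercased content (inner loop over the indicators) instead of A's six independent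
-- substring searches.

-- ===== PORT A =====
def pvIndicators : List String :=
  ["deceptive site", "security warning", "blocked by", "malicious", "phishing", "dangerous"]

-- A's for-loop with early return over the indicator list
def pvLoopA (content_lower : String) : List String → Bool
  | [] => false
  | ind :: rest => if PySem.Str.isIn ind content_lower then true else pvLoopA content_lower rest

def check_if_blocked_py (html_content : String) : Bool :=
  let content_lower := PySem.Str.lower html_content
  pvLoopA content_lower pvIndicators

-- ===== PORT B =====
-- B's outer loop: for each position i (suffix of the content), test every indicator with startswith
def pvScanB (inds : List (List Char)) : List Char → Bool
  | [] => false
  | c :: rest =>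
      if inds.any (fun ind => PySem.Chars.startswith (c :: rest) ind) then true
      else pvScanB inds rest

def check_if_blocked_py_alt (html_content : String) : Bool :=
  let content := PySem.Str.lower html_content
  pvScanB (pvIndicators.map String.toList) content.toList

-- ===== PRECONDITION & SPEC =====
def Spec_check_if_blocked_py (html_content : String) (out : Bool) : Prop := out = check_if_blocked_py_alt html_content
instance (html_content : String) (out : Bool) : Decidable (Spec_check_if_blocked_py html_content out) := by unfold Spec_check_if_blocked_py; infer_instance

-- ===== CLAIM (what is proved, stated in full; the proofs are below) =====
def Claim_equal_check_if_blocked_py : Prop := ∀ (html_content : String), Dom_check_if_blocked_py html_content → Spec_check_if_blocked_py html_content (check_if_blocked_py html_content)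

-- ===== LEMMAS AND PROOFS =====

theorem pvLoopA_iff (s : String) (inds : List String) :
    pvLoopA s inds = true ↔ ∃ ind ∈ inds, ind.toList <:+: s.toList := by
  induction inds with
  | nil => simp [pvLoopA]
  | cons a rest ih =>
      simp only [pvLoopA]
      split_ifs with h
      · simp only [true_iff]
        exact ⟨a, List.mem_cons_self, (PySem.Str.isIn_iff_infix a s).mp h⟩
      · rw [ih]
        constructor
        · rintro ⟨i, hi, hinf⟩; exact ⟨i, List.mem_cons_of_mem _ hi, hinf⟩
        · rintro ⟨i, hi, hinf⟩
          rcases List.mem_cons.mp hi with rfl | hi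
          · exact absurd ((PySem.Str.isIn_iff_infix i s).mpr hinf) (by simpa using h)
          · exact ⟨i, hi, hinf⟩

theorem pvScanB_iff (inds : List (List Char)) (h : ∀ ind ∈ inds, ind ≠ []) (cs : List Char) :
    pvScanB inds cs = true ↔ ∃ ind ∈ inds, ind <:+: cs := by
  induction cs with
  | nil =>
      simp only [pvScanB, Bool.false_eq_true, false_iff]
      rintro ⟨ind, hind, hinf⟩
      exact h ind hind (List.eq_nil_of_infix_nil hinf)
  | cons c rest ih =>
      simp only [pvScanB]
      split_ifs with hany
      · simp only [true_iff]
        rcases List.any_eq_true.mp hany with ⟨ind, hind, hsw⟩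
        exact ⟨ind, hind, ((PySem.Chars.startswith_iff _ _).mp hsw).isInfix⟩
      · rw [ih]
        constructor
        · rintro ⟨ind, hind, hinf⟩; exact ⟨ind, hind, hinf.trans (List.suffix_cons c rest).isInfix⟩
        · rintro ⟨ind, hind, hinf⟩
          rcases List.infix_cons_iff.mp hinf with hp | hi
          · exact absurd (List.any_eq_true.mpr ⟨ind, hind, (PySem.Chars.startswith_iff _ _).mpr hp⟩)
              (by simpa using hany)
          · exact ⟨ind, hind, hi⟩

-- ===== VERDICT (by name: the statement is the Claim_ definition above) =====
theorem check_if_blocked_py_spec : Claim_equal_check_if_blocked_py := by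
  intro html_content _
  unfold Spec_check_if_blocked_py check_if_blocked_py check_if_blocked_py_alt
  set s := PySem.Str.lower html_content
  rw [Bool.eq_iff_iff, pvLoopA_iff, pvScanB_iff _ (by decide)]
  constructor
  · rintro ⟨ind, hind, hinf⟩; exact ⟨ind.toList, List.mem_map_of_mem hind, hinf⟩
  · rintro ⟨ind, hind, hinf⟩
    rcases List.mem_map.mp hind with ⟨i, hi, rfl⟩
    exact ⟨i, hi, hinf⟩
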